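-- pv_equiv track=rewrite | github.com/emt0147t/codeptit2 | tools/auto_testcases.py | _count_alt_groups
-- ===== SOURCE A (Python) =====
-- def _count_alt_groups(s):
--     """Count groups of alternating chars in circular string"""
--     n = len(s)
--     if n < 3: return 0
--     count = 0
--     for i in range(n):
--         if s[i] != s[(i-1) % n] and s[i] != s[(i+1) % n]:
--             count += 1
--     return count
-- ===== SOURCE B (Python) =====
-- def _count_alt_groups(s):
--     """Count groups of alternating chars in circular string"""
--     n = len(s)
--     if n < 3:
--         return 0
--     # Circular run-length encoding: a char differs from both circular
--     # neighbors exactly when it forms a maximal circular run of length 1.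
--     runs = []
--     for ch in s:
--         if runs and runs[-1][0] == ch:
--             runs[-1][1] += 1
--         else:
--             runs.append([ch, 1])
--     if len(runs) > 1 and runs[0][0] == runs[-1][0]:
--         runs[0][1] += runs.pop()[1]
--     return sum(1 for _, length in runs if length == 1)
-- ===== Notes on version B (the rewrite author's own statement) =====
-- stated objective: alternative
-- what changed: B computes a circular run-length encoding of the string (merging the first and last run when they share a char) and returns the number of runs of length 1, instead of A's per-index comparison with both circular neighbors.
import Mathlib
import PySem

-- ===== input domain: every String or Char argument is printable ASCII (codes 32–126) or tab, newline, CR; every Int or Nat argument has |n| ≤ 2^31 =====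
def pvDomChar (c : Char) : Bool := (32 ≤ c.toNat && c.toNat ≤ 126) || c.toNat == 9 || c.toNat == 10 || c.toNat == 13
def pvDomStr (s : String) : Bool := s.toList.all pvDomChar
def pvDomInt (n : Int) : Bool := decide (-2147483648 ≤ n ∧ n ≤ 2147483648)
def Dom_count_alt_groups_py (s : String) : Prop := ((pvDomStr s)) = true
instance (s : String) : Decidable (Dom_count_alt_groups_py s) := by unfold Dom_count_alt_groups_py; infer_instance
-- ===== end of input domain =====

-- B replaces A's per-index comparison with both circular neighbors by a circular
-- run-length encoding: the answer is the number of circular runs of length 1 (alternative algorithm).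

-- ===== PORT A =====
-- s[j] for an index that is always in range here (A's indices are reduced mod n)
def pvIdx (cs : List Char) (j : Int) : Char := PySem.List.pyGetD cs j 'A'

def count_alt_groups_py (s : String) : Int :=
  let cs := s.toList
  let n : Int := cs.length
  if n < 3 then 0
  else
    (PySem.List.pyRange 0 n 1).foldl (fun count i =>
      if pvIdx cs i ≠ pvIdx cs (PySem.Int.mod (i - 1) n) ∧
         pvIdx cs i ≠ pvIdx cs (PySem.Int.mod (i + 1) n) then count + 1 else count) 0

-- ===== PORT B =====
-- one step of Source B's run-building loop (runs[-1][1] += 1 / runs.append([ch, 1]))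
def pvAddCh (runs : List (Char × Int)) (ch : Char) : List (Char × Int) :=
  match runs.getLast? with
  | some (c, k) => if c = ch then runs.dropLast ++ [(c, k + 1)] else runs ++ [(ch, 1)]
  | none => [(ch, 1)]

def count_alt_groups_py_alt (s : String) : Int :=
  let cs := s.toList
  let n := cs.length
  if n < 3 then 0
  else
    let runs := cs.foldl pvAddCh []
    -- if len(runs) > 1 and runs[0][0] == runs[-1][0]: runs[0][1] += runs.pop()[1]
    let runs2 :=
      if 1 < runs.length then
        match runs, runs.getLast? with
        | (c0, k0) :: t, some (cl, kl) =>
            if c0 = cl then (c0, k0 + kl) :: t.dropLast else (c0, k0) :: t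
        | rs, _ => rs
      else runs
    ((runs2.filter (fun p => p.2 == 1)).length : Int)

-- ===== PRECONDITION & SPEC =====
def Spec_count_alt_groups_py (s : String) (out : Int) : Prop := out = count_alt_groups_py_alt s
instance (s : String) (out : Int) : Decidable (Spec_count_alt_groups_py s out) := by unfold Spec_count_alt_groups_py; infer_instance

-- ===== CLAIM (what is proved, stated in full; the proofs are below) =====
def Claim_equal_count_alt_groups_py : Prop := ∀ (s : String), Dom_count_alt_groups_py s → Spec_count_alt_groups_py s (count_alt_groups_py s)

-- ===== LEMMAS AND PROOFS =====

-- spec-level run-length encoding: pvCont c k xs = runs of (c^k ++ xs), frozen left to right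
def pvCont : Char → Int → List Char → List (Char × Int)
  | c, k, [] => [(c, k)]
  | c, k, x :: xs => if x = c then pvCont c (k + 1) xs else (c, k) :: pvCont x 1 xs

-- chain count: positions of l differing from both neighbors, with boundary chars p (left) and q (right)
def pvG : Char → List Char → Char → Nat
  | _, [], _ => 0
  | p, [c], q => if c ≠ p ∧ c ≠ q then 1 else 0
  | p, c :: x :: xs, q => (if c ≠ p ∧ c ≠ x then 1 else 0) + pvG c (x :: xs) q

-- singleton-run count with boundary chars: a run (c,1) counts iff c differs from both neighbor chars
def pvS : Char → List (Char × Int) → Char → Nat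
  | _, [], _ => 0
  | p, [(c, k)], q => if k = 1 ∧ c ≠ p ∧ c ≠ q then 1 else 0
  | p, (c, k) :: (c', k') :: t, q =>
      (if k = 1 ∧ c ≠ p ∧ c ≠ c' then 1 else 0) + pvS c ((c', k') :: t) q

def pvPlain (rs : List (Char × Int)) : Nat := (rs.filter (fun p => p.2 == 1)).length

-- adjacent runs carry distinct chars
def pvAdj : List (Char × Int) → Prop
  | [] => True
  | [_] => True
  | a :: b :: t => a.1 ≠ b.1 ∧ pvAdj (b :: t)

theorem pvCont_cons_eq (c : Char) (k : Int) (xs : List Char) :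
    pvCont c k (c :: xs) = pvCont c (k + 1) xs := by simp [pvCont]

theorem pvCont_cons_ne {x c : Char} (k : Int) (xs : List Char) (h : x ≠ c) :
    pvCont c k (x :: xs) = (c, k) :: pvCont x 1 xs := by simp [pvCont, h]

theorem pv_foldl_pvAddCh (l : List Char) : ∀ (rs : List (Char × Int)) (c : Char) (k : Int),
    List.foldl pvAddCh (rs ++ [(c, k)]) l = rs ++ pvCont c k l := by
  induction l with
  | nil => intro rs c k; simp [pvCont]
  | cons x xs ih =>
    intro rs c k
    by_cases h : x = c
    · subst h
      rw [pvCont_cons_eq]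
      simp only [List.foldl_cons]
      rw [show pvAddCh (rs ++ [(x, k)]) x = rs ++ [(x, k + 1)] from by
        simp [pvAddCh, List.getLast?_concat, List.dropLast_concat]]
      exact ih rs x (k + 1)
    · rw [pvCont_cons_ne k xs h]
      simp only [List.foldl_cons]
      rw [show pvAddCh (rs ++ [(c, k)]) x = (rs ++ [(c, k)]) ++ [(x, 1)] from by
        have hcx : c ≠ x := fun hc => h hc.symm
        simp [pvAddCh, List.getLast?_concat, hcx]]
      rw [ih (rs ++ [(c, k)]) x 1, List.append_assoc]
      rfl

theorem pv_foldl_pvAddCh_nil (c : Char) (xs : List Char) :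
    List.foldl pvAddCh [] (c :: xs) = pvCont c 1 xs := by
  have := pv_foldl_pvAddCh xs [] c 1
  simpa [pvAddCh] using this

theorem pvCont_shape (xs : List Char) : ∀ (c : Char) (k : Int),
    ∃ m t, pvCont c k xs = (c, m) :: t ∧ k ≤ m := by
  induction xs with
  | nil => intro c k; exact ⟨k, [], rfl, le_refl _⟩
  | cons x xs ih =>
    intro c k
    by_cases h : x = c
    · subst h
      obtain ⟨m, t, he, hle⟩ := ih x (k + 1)
      exact ⟨m, t, by rw [pvCont_cons_eq, he], by omega⟩
    · exact ⟨k, pvCont x 1 xs, pvCont_cons_ne k xs h, le_refl _⟩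

theorem pvCont_last (xs : List Char) : ∀ (c : Char) (k : Int),
    (pvCont c k xs).getLast?.map Prod.fst = (c :: xs).getLast? := by
  induction xs with
  | nil => intro c k; simp [pvCont]
  | cons x xs ih =>
    intro c k
    by_cases h : x = c
    · subst h; rw [pvCont_cons_eq, ih]; simp
    · rw [pvCont_cons_ne k xs h]
      obtain ⟨m, t, he, _⟩ := pvCont_shape xs x 1
      rw [he, List.getLast?_cons_cons, ← he, ih, List.getLast?_cons_cons]

theorem pvCont_chain (xs : List Char) : ∀ (c : Char) (k : Int),
    pvAdj (pvCont c k xs) := by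
  induction xs with
  | nil => intro c k; simp [pvCont, pvAdj]
  | cons x xs ih =>
    intro c k
    by_cases h : x = c
    · subst h; rw [pvCont_cons_eq]; exact ih x (k + 1)
    · rw [pvCont_cons_ne k xs h]
      obtain ⟨m, t, he, _⟩ := pvCont_shape xs x 1
      rw [he]
      exact ⟨by simpa using fun hc => h hc.symm, he ▸ ih x 1⟩

theorem pvCont_sum (xs : List Char) : ∀ (c : Char) (k : Int),
    ((pvCont c k xs).map Prod.snd).sum = k + xs.length := by
  induction xs with
  | nil => intro c k; simp [pvCont]
  | cons x xs ih =>
    intro c k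
    by_cases h : x = c
    · subst h; rw [pvCont_cons_eq, ih]; simp only [List.length_cons]; push_cast; ring
    · rw [pvCont_cons_ne k xs h]; simp only [List.map_cons, List.sum_cons]
      rw [ih]; simp only [List.length_cons]; push_cast; ring

theorem pvCont_pos (xs : List Char) : ∀ (c : Char) (k : Int), 1 ≤ k →
    ∀ p ∈ pvCont c k xs, 1 ≤ p.2 := by
  induction xs with
  | nil => intro c k hk p hp; simp [pvCont] at hp; subst hp; exact hk
  | cons x xs ih =>
    intro c k hk p hp
    by_cases h : x = c
    · subst h; rw [pvCont_cons_eq] at hp; exact ih x (k + 1) (by omega) p hp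
    · rw [pvCont_cons_ne k xs h] at hp
      rcases List.mem_cons.mp hp with hp | hp
      · subst hp; exact hk
      · exact ih x 1 le_rfl p hp

theorem pvS_irrel (c : Char) (k : Int) (t : List (Char × Int)) (p p' q : Char) (hk : k ≠ 1) :
    pvS p ((c, k) :: t) q = pvS p' ((c, k) :: t) q := by
  cases t with
  | nil => simp [pvS, hk]
  | cons hd tl => cases hd; simp [pvS, hk]

theorem pvM (xs : List Char) : ∀ (c : Char) (k : Int) (p q : Char), 1 ≤ k → (k = 1 ∨ p = c) →
    pvS p (pvCont c k xs) q = pvG p (c :: xs) q := by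
  induction xs with
  | nil =>
    intro c k p q hk h
    rcases h with h | h
    · subst h; simp [pvCont, pvG, pvS]
    · subst h; simp [pvCont, pvG, pvS]
  | cons x xs ih =>
    intro c k p q hk h
    by_cases hx : x = c
    · subst hx
      rw [pvCont_cons_eq]
      obtain ⟨m, t, he, hle⟩ := pvCont_shape xs x (k + 1)
      rw [he, pvS_irrel x m t p x q (by omega), ← he]
      rw [ih x (k + 1) x q (by omega) (Or.inr rfl)]
      simp [pvG]
    · rw [pvCont_cons_ne k xs hx]
      obtain ⟨m, t, he, hle⟩ := pvCont_shape xs x 1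
      rw [he]
      have htail : pvS c ((x, m) :: t) q = pvG c (x :: xs) q := by
        rw [← he]; exact ih x 1 c q le_rfl (Or.inl rfl)
      cases t with
      | nil =>
        simp only [pvS, htail, pvG]
        congr 1
        rcases h with h | h
        · subst h; simp
        · subst h; simp [hx]
      | cons hd tl =>
        cases hd
        simp only [pvS, htail]
        have : pvG p (c :: x :: xs) q = (if c ≠ p ∧ c ≠ x then 1 else 0) + pvG c (x :: xs) q := rfl
        rw [this]
        congr 1
        rcases h with h | h
        · subst h; simp
        · subst h; simp [hx]

theorem pvP1 (rs : List (Char × Int)) : ∀ (p q : Char),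
    pvAdj rs →
    (∀ x ∈ rs.head?, x.1 ≠ p) → (∀ x ∈ rs.getLast?, x.1 ≠ q) →
    pvS p rs q = pvPlain rs := by
  induction rs with
  | nil => intro p q _ _ _; simp [pvS, pvPlain]
  | cons hd t ih =>
    intro p q hch hh hl
    obtain ⟨c, k⟩ := hd
    cases t with
    | nil =>
      have h1 : c ≠ p := hh (c, k) rfl
      have h2 : c ≠ q := hl (c, k) (by simp)
      by_cases hk : k = 1 <;> simp [pvS, pvPlain, h1, h2, hk]
    | cons hd' t' =>
      obtain ⟨c', k'⟩ := hd'
      have h1 : c ≠ p := hh (c, k) rfl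
      have h2 : c ≠ c' := hch.1
      have htl : pvS c ((c', k') :: t') q = pvPlain ((c', k') :: t') := by
        refine ih c q hch.2 ?_ ?_
        · intro x hx; simp at hx; subst hx; exact fun hc => h2 hc.symm
        · intro x hx; exact hl x (by rw [List.getLast?_cons_cons]; exact hx)
      by_cases hk : k = 1 <;>
        simp [pvS, pvPlain, h1, h2, hk, htl, pvPlain] at htl ⊢ <;> omega

theorem pvP2 (rs : List (Char × Int)) : ∀ (p q : Char),
    pvAdj rs →
    (∀ x ∈ rs.head?, x.1 ≠ p) → (∀ x ∈ rs.getLast?, x.1 = q) →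
    pvS p rs q = pvPlain rs.dropLast := by
  induction rs with
  | nil => intro p q _ _ _; simp [pvS, pvPlain]
  | cons hd t ih =>
    intro p q hch hh hl
    obtain ⟨c, k⟩ := hd
    cases t with
    | nil =>
      have h2 : c = q := hl (c, k) (by simp)
      simp [pvS, pvPlain, h2]
    | cons hd' t' =>
      obtain ⟨c', k'⟩ := hd'
      have h1 : c ≠ p := hh (c, k) rfl
      have h2 : c ≠ c' := hch.1
      have htl : pvS c ((c', k') :: t') q = pvPlain (((c', k') :: t').dropLast) := by
        refine ih c q hch.2 ?_ ?_
        · intro x hx; simp at hx; subst hx; exact fun hc => h2 hc.symm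
        · intro x hx; exact hl x (by rw [List.getLast?_cons_cons]; exact hx)
      have hdl : ((c, k) :: (c', k') :: t').dropLast = (c, k) :: ((c', k') :: t').dropLast := by
        simp
      rw [hdl]
      by_cases hk : k = 1 <;>
        simp [pvS, pvPlain, h1, h2, hk, htl, pvPlain] at htl ⊢ <;> omega

-- pvG as an index count
theorem pvGi (l : List Char) : ∀ (p q : Char),
    pvG p l q = (List.range l.length).countP (fun i => decide (
      (l.getD i 'A' ≠ (if i = 0 then p else l.getD (i - 1) 'A')) ∧
      (l.getD i 'A' ≠ (if i = l.length - 1 then q else l.getD (i + 1) 'A')))) := by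
  induction l with
  | nil => intro p q; simp [pvG]
  | cons c t ih =>
    intro p q
    cases t with
    | nil =>
      by_cases h1 : c = p <;> by_cases h2 : c = q <;>
        simp [pvG, List.range_one, h1, h2]
    | cons x xs =>
      rw [show List.range (c :: x :: xs).length = 0 :: (List.range (x :: xs).length).map Nat.succ
          from by rw [show (c :: x :: xs).length = (x :: xs).length + 1 from rfl,
            List.range_succ_eq_map],
        List.countP_cons, List.countP_map]
      have hstep : List.countP
            ((fun i => decide (
              ((c :: x :: xs).getD i 'A' ≠ (if i = 0 then p else (c :: x :: xs).getD (i - 1) 'A')) ∧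
              ((c :: x :: xs).getD i 'A' ≠ (if i = (c :: x :: xs).length - 1 then q
                  else (c :: x :: xs).getD (i + 1) 'A')))) ∘ Nat.succ)
            (List.range (x :: xs).length)
          = List.countP (fun i => decide (
              ((x :: xs).getD i 'A' ≠ (if i = 0 then c else (x :: xs).getD (i - 1) 'A')) ∧
              ((x :: xs).getD i 'A' ≠ (if i = (x :: xs).length - 1 then q
                  else (x :: xs).getD (i + 1) 'A'))))
            (List.range (x :: xs).length) := by
        apply List.countP_congr
        intro i hi
        have hi' : i < (x :: xs).length := List.mem_range.mp hi
        simp only [Function.comp_apply, decide_eq_decide]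
        have e1 : (c :: x :: xs).getD (i + 1) 'A' = (x :: xs).getD i 'A' := rfl
        have e2 : (if i + 1 = 0 then p else (c :: x :: xs).getD (i + 1 - 1) 'A')
            = (if i = 0 then c else (x :: xs).getD (i - 1) 'A') := by
          cases i with
          | zero => simp
          | succ j => simp
        have e3 : (if i + 1 = (c :: x :: xs).length - 1 then q
              else (c :: x :: xs).getD (i + 1 + 1) 'A')
            = (if i = (x :: xs).length - 1 then q else (x :: xs).getD (i + 1) 'A') := by
          have hl : (c :: x :: xs).length - 1 = (x :: xs).length := rfl
          by_cases hb : i = (x :: xs).length - 1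
          · have hb1 : i + 1 = (c :: x :: xs).length - 1 := by
              simp only [List.length_cons] at hb hi' ⊢; omega
            rw [if_pos hb, if_pos hb1]
          · have hb1 : ¬ (i + 1 = (c :: x :: xs).length - 1) := by
              simp only [List.length_cons] at hb hi' ⊢; omega
            rw [if_neg hb, if_neg hb1]
            rfl
        rw [e1, e2, e3]
      rw [hstep, ← ih c q,
        show pvG p (c :: x :: xs) q = (if c ≠ p ∧ c ≠ x then 1 else 0) + pvG c (x :: xs) q
          from rfl, Nat.add_comm]
      congr 1
      have h2 : ¬ ((0 : Nat) = (c :: x :: xs).length - 1) := by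
        simp only [List.length_cons]; omega
      by_cases h1 : c = p <;> by_cases hx2 : c = x <;> simp [h1, hx2, h2]

-- the boundary chars used on both sides
theorem pv_getD_last (cs : List Char) (h : cs ≠ []) :
    cs.getD (cs.length - 1) 'A' = (cs.getLast?).getD 'A' := by
  rw [List.getLast?_eq_getElem?, List.getD_eq_getElem?_getD]

-- A's fold equals the chain count with circular boundary chars
theorem pvA_eq (cs : List Char) (hn : 3 ≤ cs.length) :
    (PySem.List.pyRange 0 (cs.length : Int) 1).foldl (fun count i =>
        if pvIdx cs i ≠ pvIdx cs (PySem.Int.mod (i - 1) (cs.length : Int)) ∧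
           pvIdx cs i ≠ pvIdx cs (PySem.Int.mod (i + 1) (cs.length : Int)) then count + 1
        else count) (0 : Int)
    = (pvG (cs.getD (cs.length - 1) 'A') cs (cs.getD 0 'A') : Int) := by
  have hn0 : 0 < cs.length := by omega
  rw [PySem.List.pyRange_one, List.foldl_map]
  simp only [zero_add, sub_zero, Int.toNat_natCast]
  rw [PySem.List.foldl_congr_mem _ _ (fun (count : Int) (i : Nat) =>
      if (decide (
          (cs.getD i 'A' ≠ (if i = 0 then cs.getD (cs.length - 1) 'A' else cs.getD (i - 1) 'A')) ∧
          (cs.getD i 'A' ≠ (if i = cs.length - 1 then cs.getD 0 'A' else cs.getD (i + 1) 'A'))) = true)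
      then count + 1 else count) _
    (by
      intro acc i hi
      have hi' : i < cs.length := List.mem_range.mp hi
      beta_reduce
      refine if_congr ?_ rfl rfl
      rw [decide_eq_true_eq]
      have hmodm : PySem.Int.mod ((i : Int) - 1) (cs.length : Int)
          = (((i + cs.length - 1) % cs.length : Nat) : Int) := by
        rw [PySem.Int.mod_eq_emod_of_pos (by exact_mod_cast hn0)]
        rcases Nat.eq_zero_or_pos i with h0 | h1
        · subst h0
          have h2 : 0 + cs.length - 1 = cs.length - 1 := by omega
          rw [h2, Nat.mod_eq_of_lt (by omega)]
          have h3 : ((0 : Nat) : Int) - 1 = ((cs.length - 1 : Nat) : Int) - (cs.length : Int) := by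
            omega
          rw [h3, Int.sub_emod_right, Int.emod_eq_of_lt (by omega) (by omega)]
        · have hlt2 : i - 1 < cs.length := by omega
          have h2 : i + cs.length - 1 = (i - 1) + cs.length := by omega
          rw [h2, Nat.add_mod_right, Nat.mod_eq_of_lt hlt2]
          have h3 : (i : Int) - 1 = ((i - 1 : Nat) : Int) := by omega
          rw [h3, Int.emod_eq_of_lt (by omega) (by exact_mod_cast hlt2)]
      have hmodp : PySem.Int.mod ((i : Int) + 1) (cs.length : Int)
          = (((i + 1) % cs.length : Nat) : Int) := by
        have h : (i : Int) + 1 = ((i + 1 : Nat) : Int) := by push_cast; ring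
        rw [h, PySem.Int.mod_natCast]
      rw [hmodm, hmodp]
      have hm1 : (i + cs.length - 1) % cs.length = if i = 0 then cs.length - 1 else i - 1 := by
        rcases Nat.eq_zero_or_pos i with h0 | h1
        · subst h0
          rw [if_pos rfl]
          have h2 : 0 + cs.length - 1 = cs.length - 1 := by omega
          rw [h2, Nat.mod_eq_of_lt (by omega)]
        · rw [if_neg (by omega)]
          have h2 : i + cs.length - 1 = (i - 1) + cs.length := by omega
          rw [h2, Nat.add_mod_right, Nat.mod_eq_of_lt (by omega)]
      have hm2 : (i + 1) % cs.length = if i = cs.length - 1 then 0 else i + 1 := by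
        by_cases hb : i = cs.length - 1
        · rw [if_pos hb, show i + 1 = cs.length from by omega, Nat.mod_self]
        · rw [if_neg hb, Nat.mod_eq_of_lt (by omega)]
      rw [hm1, hm2]
      simp only [pvIdx, PySem.List.pyGetD_natCast]
      constructor
      · rintro ⟨ha, hb⟩
        refine ⟨?_, ?_⟩
        · split_ifs with h0
          · subst h0; simpa using ha
          · simpa [h0] using ha
        · split_ifs with h0
          · subst h0; simpa using hb
          · simpa [h0] using hb
      · rintro ⟨ha, hb⟩
        refine ⟨?_, ?_⟩
        · split_ifs at ha with h0
          · subst h0; simpa using ha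
          · simpa [h0] using ha
        · split_ifs at hb with h0
          · subst h0; simpa using hb
          · simpa [h0] using hb)]
  rw [PySem.List.foldl_count_if]
  rw [pvGi]
  norm_num

-- B's run-length pipeline equals the same chain count
theorem pvB_eq (cs : List Char) (hn : 3 ≤ cs.length) :
    (let runs := cs.foldl pvAddCh []
     let runs2 :=
       if 1 < runs.length then
         match runs, runs.getLast? with
         | (c0, k0) :: t, some (cl, kl) =>
             if c0 = cl then (c0, k0 + kl) :: t.dropLast else (c0, k0) :: t
         | rs, _ => rs
       else runs
     ((runs2.filter (fun p => p.2 == 1)).length : Int))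
    = (pvG (cs.getD (cs.length - 1) 'A') cs (cs.getD 0 'A') : Int) := by
  cases cs with
  | nil => simp at hn
  | cons c xs =>
    simp only []
    rw [pv_foldl_pvAddCh_nil]
    have hq0 : (c :: xs).getD 0 'A' = c := rfl
    have hlast2 : (pvCont c 1 xs).getLast?.map Prod.fst = ((c :: xs).getLast?) :=
      pvCont_last xs c 1
    have hp : (c :: xs).getD ((c :: xs).length - 1) 'A' = ((c :: xs).getLast?).getD 'A' :=
      pv_getD_last _ (by simp)
    obtain ⟨m0, t, he, hm0⟩ := pvCont_shape xs c 1
    have hM : pvS ((c :: xs).getD ((c :: xs).length - 1) 'A') (pvCont c 1 xs)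
          ((c :: xs).getD 0 'A')
        = pvG ((c :: xs).getD ((c :: xs).length - 1) 'A') (c :: xs) ((c :: xs).getD 0 'A') :=
      pvM xs c 1 _ _ le_rfl (Or.inl rfl)
    rw [← hM]
    cases t with
    | nil =>
      -- a single run: the whole circular string is one character
      rw [he]
      have hm : m0 = 1 + (xs.length : Int) := by
        have := pvCont_sum xs c 1
        rw [he] at this
        simpa using this
      have hm1 : m0 ≠ 1 := by
        have : 2 ≤ xs.length := by simpa using hn
        omega
      have hlen : ¬ (1 < ([((c, m0) : Char × Int)]).length) := by simp
      rw [if_neg hlen]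
      have hcl : ((c :: xs).getLast?).getD 'A' = c := by
        rw [← hlast2, he]; rfl
      rw [hp, hq0, hcl]
      simp [pvS, hm1]
    | cons hd tl =>
      obtain ⟨c1, k1⟩ := hd
      have hlen : 1 < (pvCont c 1 xs).length := by rw [he]; simp
      rw [if_pos hlen]
      have hsome : ((pvCont c 1 xs).getLast?).isSome := by
        rw [he]; exact List.getLast?_isSome.mpr (by simp)
      obtain ⟨⟨cl, kl⟩, hgl⟩ := Option.isSome_iff_exists.mp hsome
      have hclchar : ((c :: xs).getLast?).getD 'A' = cl := by
        rw [← hlast2, hgl]; rfl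
      have hklpos : 1 ≤ kl := by
        exact pvCont_pos xs c 1 le_rfl _ (List.mem_of_getLast? hgl)
      have hadj : pvAdj (pvCont c 1 xs) := pvCont_chain xs c 1
      have hgl_t : ((c1, k1) :: tl).getLast? = some (cl, kl) := by
        rw [he, List.getLast?_cons_cons] at hgl; exact hgl
      rw [he, show ((c, m0) :: (c1, k1) :: tl).getLast? = some (cl, kl) from by
        rw [List.getLast?_cons_cons]; exact hgl_t]
      rw [hp, hq0, hclchar]
      have hadj' : pvAdj ((c, m0) :: (c1, k1) :: tl) := he ▸ hadj
      show (((if c = cl then (c, m0 + kl) :: ((c1, k1) :: tl).dropLast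
              else (c, m0) :: (c1, k1) :: tl).filter (fun p => p.2 == 1)).length : Int)
          = (pvS cl ((c, m0) :: (c1, k1) :: tl) c : Int)
      by_cases hc : c = cl
      · rw [if_pos hc]
        have hne1 : ¬ ((m0 + kl) == (1 : Int)) = true := by
          simp only [beq_iff_eq]; omega
        have hS : pvS cl ((c, m0) :: (c1, k1) :: tl) c
            = pvS c ((c1, k1) :: tl) c := by
          show (if m0 = 1 ∧ c ≠ cl ∧ c ≠ c1 then 1 else 0) + pvS c ((c1, k1) :: tl) c
              = pvS c ((c1, k1) :: tl) c
          rw [if_neg (by tauto), Nat.zero_add]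
        rw [hS]
        have hP2 : pvS c ((c1, k1) :: tl) c = pvPlain (((c1, k1) :: tl).dropLast) := by
          apply pvP2
          · exact hadj'.2
          · intro x hx
            simp only [List.head?_cons, Option.mem_def, Option.some_inj] at hx
            subst hx
            exact fun hcc => hadj'.1 hcc.symm
          · intro x hx
            rw [hgl_t] at hx
            simp only [Option.mem_def, Option.some_inj] at hx
            subst hx
            exact hc.symm
        rw [hP2, List.filter_cons, if_neg hne1]
        rfl
      · rw [if_neg hc]
        have hP1 : pvS cl ((c, m0) :: (c1, k1) :: tl) c
            = pvPlain ((c, m0) :: (c1, k1) :: tl) := by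
          apply pvP1
          · exact hadj'
          · intro x hx
            simp only [List.head?_cons, Option.mem_def, Option.some_inj] at hx
            subst hx
            exact hc
          · intro x hx
            rw [List.getLast?_cons_cons, hgl_t] at hx
            simp only [Option.mem_def, Option.some_inj] at hx
            subst hx
            exact fun hcc => hc hcc.symm
        rw [hP1]
        rfl

-- ===== VERDICT (by name: the statement is the Claim_ definition above) =====
theorem count_alt_groups_py_spec : Claim_equal_count_alt_groups_py := by
  intro s _
  unfold Spec_count_alt_groups_py count_alt_groups_py count_alt_groups_py_alt
  set cs := s.toList with hcs
  by_cases h3 : ((cs.length : Int) < 3)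
  · rw [if_pos h3, if_pos (by exact_mod_cast h3)]
  · have hn : 3 ≤ cs.length := by omega
    rw [if_neg h3, if_neg (by omega)]
    rw [pvA_eq cs hn, pvB_eq cs hn]
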